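-- pv_equiv track=rewrite | github.com/California3/Programming-for-Scientists | .history/check_20231113123659.py | decrypt_find_e
-- ===== SOURCE A (Python) =====
-- def caesar_shift(string, shift):
--     #TODO: implement this function
--     result = ""
--     for s in string:
--         if s.isalpha():
--             if s.isupper():
--                 result += chr((ord(s) + shift - 65) % 26 + 65)
--             else:
--                 result += chr((ord(s) + shift - 97) % 26 + 97)
--         else:
--             result += s
--     return result
--
-- def decrypt_find_e(code):
--     """Decrypt Caesar ciphered message by finding most frequently occuring letter
--     assume it is an "e" and return the corresponding shift.
--     """
--     #TODO: implement this function
--     countings = []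
--     for i in range(-26,26):
--         result = caesar_shift(code, i)
--         count_e = 0
--         for s in result:
--             if s == "e" or s == "E":
--                 count_e += 1
--         countings.append(count_e)
--
--
--     return 26 - countings.index(max(countings))
-- ===== SOURCE B (Python) =====
-- def decrypt_find_e(code):
--     """Decrypt Caesar ciphered message by finding most frequently occuring letter
--     assume it is an "e" and return the corresponding shift.
--     """
--     # One pass: tally letter frequencies (case-folded); shifting by i turns a
--     # letter of index (4 - i) % 26 into 'e', so the e-count for shift i is just
--     # freq[(4 - i) % 26].  A's 52 shifts repeat with period 26 and its first
--     # maximum lies among shifts -26..-1, i.e. residues 0..25 in order.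
--     freq = [0] * 26
--     for ch in code:
--         if ch.isalpha():
--             freq[(ord(ch.lower()) - 97) % 26] += 1
--     best = -1
--     best_r = 0
--     for r in range(26):
--         c = freq[(4 - r) % 26]
--         if best < c:
--             best = c
--             best_r = r
--     return 26 - best_r
-- ===== Notes on version B (the rewrite author's own statement) =====
-- stated objective: faster
-- what changed: Instead of building all 52 Caesar-shifted copies of the text and recounting 'e'/'E' in each, B tallies case-folded letter frequencies in a single pass and reads the e-count of shift r directly as freq[(4 - r) % 26], scanning the 26 residues for the first maximum.
import Mathlib
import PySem

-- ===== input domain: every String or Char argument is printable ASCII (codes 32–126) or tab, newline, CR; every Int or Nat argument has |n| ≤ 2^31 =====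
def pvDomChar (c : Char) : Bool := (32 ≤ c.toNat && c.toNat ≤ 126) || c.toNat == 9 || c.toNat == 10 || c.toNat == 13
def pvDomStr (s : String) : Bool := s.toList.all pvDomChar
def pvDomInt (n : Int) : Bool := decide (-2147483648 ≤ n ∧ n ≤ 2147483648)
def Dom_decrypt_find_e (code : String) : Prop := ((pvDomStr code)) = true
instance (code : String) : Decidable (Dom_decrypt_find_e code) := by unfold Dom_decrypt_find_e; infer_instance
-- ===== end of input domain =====

-- B replaces A's 52 full Caesar-shift-and-recount passes by one frequency-count pass
-- plus a 26-entry scan (objective: faster).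

-- ===== PORT A =====
-- helper: caesar_shift, building the shifted string character by character
def pvCaesarA (s : List Char) (shift : Int) : List Char :=
  s.foldl (fun result c =>
    if PySem.Chars.isalpha c then
      if PySem.Chars.isupper c then
        result ++ [Char.ofNat (PySem.Int.mod ((c.toNat : Int) + shift - 65) 26 + 65).toNat]
      else
        result ++ [Char.ofNat (PySem.Int.mod ((c.toNat : Int) + shift - 97) 26 + 97).toNat]
    else
      result ++ [c]) []

def decrypt_find_e (code : String) : Int :=
  let countings : List Int :=
    (PySem.List.pyRange (-26) 26 1).foldl (fun countings i =>
      let result := pvCaesarA code.toList i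
      let count_e := result.foldl (fun count_e s =>
        if s = 'e' ∨ s = 'E' then count_e + 1 else count_e) (0 : Int)
      countings ++ [count_e]) []
  -- max(countings) then countings.index(...): countings always has 52 entries,
  -- so the none branches are unreachable
  match PySem.List.max? countings (fun x => x) with
  | none => 0
  | some m =>
    match PySem.List.index? countings m with
    | none => 0
    | some k => 26 - (k : Int)

-- ===== PORT B =====
def decrypt_find_e_alt (code : String) : Int :=
  let freq : List Int :=
    code.toList.foldl (fun freq c =>
      if PySem.Chars.isalpha c then
        let j := (PySem.Int.mod (((PySem.Chars.lowerChar c).toNat : Int) - 97) 26).toNat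
        freq.set j (freq.getD j 0 + 1)
      else freq) (List.replicate 26 (0 : Int))
  let best :=
    (PySem.List.pyRange 0 26 1).foldl (fun (best : Int × Int) r =>
      let c := PySem.List.pyGetD freq (PySem.Int.mod (4 - r) 26) 0
      if best.1 < c then (c, r) else best) ((-1 : Int), (0 : Int))
  26 - best.2

-- ===== PRECONDITION & SPEC =====
def Spec_decrypt_find_e (code : String) (out : Int) : Prop := out = decrypt_find_e_alt code
instance (code : String) (out : Int) : Decidable (Spec_decrypt_find_e code out) := by unfold Spec_decrypt_find_e; infer_instance

-- ===== CLAIM (what is proved, stated in full; the proofs are below) =====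
def Claim_equal_decrypt_find_e : Prop := ∀ (code : String), Dom_decrypt_find_e code → Spec_decrypt_find_e code (decrypt_find_e code)

-- ===== LEMMAS AND PROOFS =====

-- lowercase letter index of a character, as A's arithmetic sees it
def pvLow (c : Char) : Int := ((PySem.Chars.lowerChar c).toNat : Int) - 97

-- number of letters of l with case-folded index j
def pvCnt (l : List Char) (j : Int) : Int :=
  ((l.countP (fun c => PySem.Chars.isalpha c && decide (pvLow c = j))) : Int)

-- the per-shift e-count both programs compute
def pvG (l : List Char) (r : Int) : Int := pvCnt l (PySem.Int.mod (4 - r) 26)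

lemma pv_char_eq_iff (a b : Char) : a = b ↔ a.toNat = b.toNat := by
  constructor
  · intro h; rw [h]
  · intro h; exact Char.ext (UInt32.toNat_inj.mp h)

lemma pv_ofNat_toNat {n : Nat} (h : n < 55296) : (Char.ofNat n).toNat = n := by
  rw [Char.toNat_ofNat]
  have : n.isValidChar := Or.inl h
  simp [this]

lemma pv_isupper_iff (c : Char) : PySem.Chars.isupper c = true ↔ 65 ≤ c.toNat ∧ c.toNat ≤ 90 := by
  simp only [PySem.Chars.isupper, Bool.and_eq_true, decide_eq_true_eq, Char.le_def,
    UInt32.le_iff_toNat_le]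
  exact Iff.rfl

lemma pv_islower_iff (c : Char) : PySem.Chars.islower c = true ↔ 97 ≤ c.toNat ∧ c.toNat ≤ 122 := by
  simp only [PySem.Chars.islower, Bool.and_eq_true, decide_eq_true_eq, Char.le_def,
    UInt32.le_iff_toNat_le]
  exact Iff.rfl

lemma pv_caesar_map (l : List Char) (i : Int) :
    pvCaesarA l i = l.map (fun c =>
      if PySem.Chars.isalpha c then
        if PySem.Chars.isupper c then
          Char.ofNat (PySem.Int.mod ((c.toNat : Int) + i - 65) 26 + 65).toNat
        else
          Char.ofNat (PySem.Int.mod ((c.toNat : Int) + i - 97) 26 + 97).toNat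
      else c) := by
  unfold pvCaesarA
  rw [show (fun (result : List Char) c =>
      if PySem.Chars.isalpha c then
        if PySem.Chars.isupper c then
          result ++ [Char.ofNat (PySem.Int.mod ((c.toNat : Int) + i - 65) 26 + 65).toNat]
        else
          result ++ [Char.ofNat (PySem.Int.mod ((c.toNat : Int) + i - 97) 26 + 97).toNat]
      else
        result ++ [c])
    = (fun (result : List Char) c => result ++ [if PySem.Chars.isalpha c then
        if PySem.Chars.isupper c then
          Char.ofNat (PySem.Int.mod ((c.toNat : Int) + i - 65) 26 + 65).toNat
        else
          Char.ofNat (PySem.Int.mod ((c.toNat : Int) + i - 97) 26 + 97).toNat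
      else c]) from by funext result c; split_ifs <;> rfl]
  rw [PySem.List.foldl_append_eq_flatMap]
  rw [List.nil_append]
  induction l with
  | nil => rfl
  | cons c l ih => rw [List.flatMap_cons, List.map_cons, List.singleton_append, ih]

lemma pv_count_fold (l : List Char) (init : Int) :
    l.foldl (fun count_e s => if s = 'e' ∨ s = 'E' then count_e + 1 else count_e) init
      = init + ((l.countP (fun s => decide (s = 'e') || decide (s = 'E'))) : Int) := by
  induction l generalizing init with
  | nil => simp
  | cons c l ih =>
    simp only [List.foldl_cons, List.countP_cons, ih]
    by_cases h1 : c = 'e' <;> by_cases h2 : c = 'E' <;> simp [h1, h2] <;> ring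

-- pointwise: the shifted character is an e/E exactly when the source letter has
-- case-folded index (4 - i) % 26
lemma pv_shift_pred (i : Int) (c : Char) :
    ((decide ((if PySem.Chars.isalpha c then
        if PySem.Chars.isupper c then
          Char.ofNat (PySem.Int.mod ((c.toNat : Int) + i - 65) 26 + 65).toNat
        else
          Char.ofNat (PySem.Int.mod ((c.toNat : Int) + i - 97) 26 + 97).toNat
      else c) = 'e')) ||
     (decide ((if PySem.Chars.isalpha c then
        if PySem.Chars.isupper c then
          Char.ofNat (PySem.Int.mod ((c.toNat : Int) + i - 65) 26 + 65).toNat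
        else
          Char.ofNat (PySem.Int.mod ((c.toNat : Int) + i - 97) 26 + 97).toNat
      else c) = 'E')))
    = (PySem.Chars.isalpha c && decide (pvLow c = PySem.Int.mod (4 - i) 26)) := by
  have h26 : (0:Int) < 26 := by norm_num
  have hee : ('e').toNat = 101 := rfl
  have hEE : ('E').toNat = 69 := rfl
  simp only [PySem.Int.mod_eq_emod_of_pos h26]
  by_cases ha : PySem.Chars.isalpha c = true
  · have ha' := ha
    rw [PySem.Chars.isalpha, Bool.or_eq_true] at ha'
    by_cases hu : PySem.Chars.isupper c = true
    · have hb := (pv_isupper_iff c).mp hu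
      have hlow : pvLow c = (c.toNat : Int) - 65 := by
        unfold pvLow PySem.Chars.lowerChar
        rw [if_pos hu, pv_ofNat_toNat (by omega)]
        push_cast; omega
      rw [if_pos ha, if_pos hu, ha, Bool.true_and]
      have he1 : 0 ≤ ((c.toNat : Int) + i - 65) % 26 := Int.emod_nonneg _ (by norm_num)
      have he2 : ((c.toNat : Int) + i - 65) % 26 < 26 := Int.emod_lt_of_pos _ h26
      simp only [pv_char_eq_iff, hee, hEE, pv_ofNat_toNat (show ((((c.toNat : Int) + i - 65) % 26 + 65).toNat < 55296) by omega)]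
      rw [Bool.eq_iff_iff]
      simp only [Bool.or_eq_true, decide_eq_true_eq]
      rw [hlow]
      omega
    · have hl := (pv_islower_iff c).mp (by tauto)
      have hlow : pvLow c = (c.toNat : Int) - 97 := by
        unfold pvLow PySem.Chars.lowerChar
        rw [if_neg hu]
      rw [if_pos ha, if_neg hu, ha, Bool.true_and]
      have he1 : 0 ≤ ((c.toNat : Int) + i - 97) % 26 := Int.emod_nonneg _ (by norm_num)
      have he2 : ((c.toNat : Int) + i - 97) % 26 < 26 := Int.emod_lt_of_pos _ h26
      simp only [pv_char_eq_iff, hee, hEE, pv_ofNat_toNat (show ((((c.toNat : Int) + i - 97) % 26 + 97).toNat < 55296) by omega)]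
      rw [Bool.eq_iff_iff]
      simp only [Bool.or_eq_true, decide_eq_true_eq]
      rw [hlow]
      omega
  · have ha' : PySem.Chars.isalpha c = false := by
      cases hx : PySem.Chars.isalpha c
      · rfl
      · exact absurd hx ha
    have hnu : ¬ (65 ≤ c.toNat ∧ c.toNat ≤ 90) := by
      intro hx
      rw [PySem.Chars.isalpha, Bool.or_eq_true] at ha
      exact ha (Or.inl ((pv_isupper_iff c).mpr hx))
    have hnl : ¬ (97 ≤ c.toNat ∧ c.toNat ≤ 122) := by
      intro hx
      rw [PySem.Chars.isalpha, Bool.or_eq_true] at ha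
      exact ha (Or.inr ((pv_islower_iff c).mpr hx))
    rw [if_neg ha, ha', Bool.false_and]
    simp only [pv_char_eq_iff, hee, hEE]
    simp only [Bool.or_eq_false_iff, decide_eq_false_iff_not]
    constructor <;> omega

-- A's e-count for shift i equals pvG
lemma pv_countings_entry (l : List Char) (i : Int) :
    (pvCaesarA l i).foldl (fun count_e s => if s = 'e' ∨ s = 'E' then count_e + 1 else count_e) (0 : Int)
      = pvG l i := by
  rw [pv_caesar_map, pv_count_fold, List.countP_map]
  have hfun : ((fun s => decide (s = 'e') || decide (s = 'E')) ∘ (fun c =>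
      if PySem.Chars.isalpha c then
        if PySem.Chars.isupper c then
          Char.ofNat (PySem.Int.mod ((c.toNat : Int) + i - 65) 26 + 65).toNat
        else
          Char.ofNat (PySem.Int.mod ((c.toNat : Int) + i - 97) 26 + 97).toNat
      else c))
      = (fun c => PySem.Chars.isalpha c && decide (pvLow c = PySem.Int.mod (4 - i) 26)) := by
    funext c
    exact pv_shift_pred i c
  rw [hfun]
  unfold pvG pvCnt
  ring

-- A's countings list is two copies of the residue table
lemma pv_countings_split (l : List Char) :
    (PySem.List.pyRange (-26) 26 1).map (pvG l)
      = (PySem.List.pyRange 0 26 1).map (pvG l) ++ (PySem.List.pyRange 0 26 1).map (pvG l) := by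
  rw [PySem.List.pyRange_one_append (-26) 0 26 (by norm_num) (by norm_num), List.map_append]
  have hcongr : ∀ (x y z : List Int), x = y → x ++ z = y ++ z := by intro x y z h; rw [h]
  apply hcongr
  rw [PySem.List.pyRange_one (-26) 0, PySem.List.pyRange_one 0 26]
  norm_num only
  rw [List.map_map, List.map_map]
  apply List.map_congr_left
  intro k _
  simp only [Function.comp_apply]
  unfold pvG
  have h26 : (0:Int) < 26 := by norm_num
  rw [PySem.Int.mod_eq_emod_of_pos h26, PySem.Int.mod_eq_emod_of_pos h26]
  have : (4 - (-26 + (k:Int))) % 26 = (4 - (0 + (k:Int))) % 26 := by omega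
  rw [this]

lemma pv_max_cons_keep (L : List Int) : ∀ (m : Int), (∀ y ∈ L, y ≤ m) →
    PySem.List.max? (m :: L) (fun x => x) = some m := by
  induction L with
  | nil => intro m _; rfl
  | cons x L ih =>
    intro m h
    have hx : ¬ ((fun x : Int => x) m < (fun x : Int => x) x) := by
      have := h x List.mem_cons_self
      simpa using this
    have ht := ih m (fun y hy => h y (List.mem_cons_of_mem _ hy))
    simp only [PySem.List.max?, List.foldl_cons] at ht ⊢
    rw [if_neg hx]
    exact ht

lemma pv_max_double (L : List Int) (m : Int) (hm : PySem.List.max? L (fun x => x) = some m) :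
    PySem.List.max? (L ++ L) (fun x => x) = some m := by
  have hle : ∀ y ∈ L, y ≤ m := fun y hy => PySem.List.max?_isMax hm y hy
  have ht := pv_max_cons_keep L m hle
  simp only [PySem.List.max?, List.foldl_cons, List.foldl_append] at hm ht ⊢
  rw [hm]
  exact ht

lemma pv_max_snoc (L : List Int) (m x : Int) (h : PySem.List.max? L (fun y => y) = some m) :
    PySem.List.max? (L ++ [x]) (fun y => y) = some (if m < x then x else m) := by
  simp only [PySem.List.max?, List.foldl_append, List.foldl_cons, List.foldl_nil] at h ⊢
  rw [h]
  by_cases hx : m < x <;> simp [hx]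

-- the argmax scan agrees with max?/index? on the same table
lemma pv_scan_spec (g : Int → Int) (hg : ∀ r, 0 ≤ g r) :
    ∀ n : Nat, 1 ≤ n →
      ∃ m k, PySem.List.max? ((PySem.List.pyRange 0 (n : Int) 1).map g) (fun x => x) = some m ∧
        PySem.List.index? ((PySem.List.pyRange 0 (n : Int) 1).map g) m = some k ∧
        (PySem.List.pyRange 0 (n : Int) 1).foldl
          (fun (best : Int × Int) r => if best.1 < g r then (g r, r) else best)
          ((-1 : Int), (0 : Int)) = (m, (k : Int)) := by
  intro n hn
  induction n with
  | zero => omega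
  | succ n ih =>
    by_cases hn1 : 1 ≤ n
    · obtain ⟨m, k, hmax, hidx, hfold⟩ := ih hn1
      have hsplit : PySem.List.pyRange 0 ((n + 1 : Nat) : Int) 1
          = PySem.List.pyRange 0 ((n : Nat) : Int) 1 ++ [(n : Int)] := by
        push_cast
        exact PySem.List.pyRange_one_succ_right (by positivity)
      have hlen : ((PySem.List.pyRange 0 ((n : Nat) : Int) 1).map g).length = n := by
        rw [List.length_map, PySem.List.length_pyRange_one]
        omega
      by_cases hx : m < g (n : Int)
      · refine ⟨g (n : Int), n, ?_, ?_, ?_⟩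
        · rw [hsplit, List.map_append, List.map_cons, List.map_nil]
          rw [pv_max_snoc _ m _ hmax, if_pos hx]
        · rw [hsplit, List.map_append, List.map_cons, List.map_nil]
          have hnotmem : g (n : Int) ∉ (PySem.List.pyRange 0 ((n : Nat) : Int) 1).map g := by
            intro hmem
            have hle := PySem.List.max?_isMax hmax _ hmem
            simp only [] at hle
            omega
          rw [PySem.List.index?_append_singleton_self _ _ hnotmem, hlen]
        · rw [hsplit, List.foldl_append, hfold, List.foldl_cons, List.foldl_nil]
          simp only [if_pos hx]
      · refine ⟨m, k, ?_, ?_, ?_⟩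
        · rw [hsplit, List.map_append, List.map_cons, List.map_nil]
          rw [pv_max_snoc _ m _ hmax, if_neg hx]
        · rw [hsplit, List.map_append, List.map_cons, List.map_nil]
          have hmem : m ∈ (PySem.List.pyRange 0 ((n : Nat) : Int) 1).map g :=
            PySem.List.max?_mem hmax
          rw [PySem.List.index?_append_of_mem _ hmem, hidx]
        · rw [hsplit, List.foldl_append, hfold, List.foldl_cons, List.foldl_nil]
          simp only [if_neg hx]
    · have hn0 : n = 0 := by omega
      subst hn0
      have h1 : PySem.List.pyRange 0 ((0 + 1 : Nat) : Int) 1 = [(0 : Int)] := by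
        have := PySem.List.pyRange_one_singleton (0 : Int)
        norm_num at this ⊢
        exact this
      refine ⟨g 0, 0, ?_, ?_, ?_⟩
      · rw [h1]; rfl
      · rw [h1, List.map_cons, List.map_nil]
        exact PySem.List.index?_cons_self _ _
      · rw [h1, List.foldl_cons, List.foldl_nil]
        have hpos : (-1 : Int) < g 0 := by have := hg 0; omega
        simp [hpos]

lemma pv_alpha_low_range (c : Char) (h : PySem.Chars.isalpha c = true) :
    0 ≤ pvLow c ∧ pvLow c < 26 := by
  unfold pvLow PySem.Chars.lowerChar
  rw [PySem.Chars.isalpha, Bool.or_eq_true] at h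
  rcases h with h | h
  · rw [if_pos h]
    rw [pv_isupper_iff] at h
    rw [pv_ofNat_toNat (by omega)]
    omega
  · have hu : PySem.Chars.isupper c ≠ true := by
      intro hc; rw [pv_isupper_iff] at hc; rw [pv_islower_iff] at h; omega
    rw [if_neg hu]
    rw [pv_islower_iff] at h
    omega

-- B's frequency table counts exactly pvCnt
lemma pv_freq_spec (l : List Char) :
    ∀ (freq : List Int), freq.length = 26 →
      (l.foldl (fun freq c =>
        if PySem.Chars.isalpha c then
          freq.set (PySem.Int.mod (((PySem.Chars.lowerChar c).toNat : Int) - 97) 26).toNat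
            (freq.getD (PySem.Int.mod (((PySem.Chars.lowerChar c).toNat : Int) - 97) 26).toNat 0 + 1)
        else freq) freq).length = 26 ∧
      ∀ j : Nat, j < 26 →
        (l.foldl (fun freq c =>
          if PySem.Chars.isalpha c then
            freq.set (PySem.Int.mod (((PySem.Chars.lowerChar c).toNat : Int) - 97) 26).toNat
              (freq.getD (PySem.Int.mod (((PySem.Chars.lowerChar c).toNat : Int) - 97) 26).toNat 0 + 1)
          else freq) freq).getD j 0
        = freq.getD j 0 + pvCnt l (j : Int) := by
  induction l with
  | nil =>
    intro freq hlen
    refine ⟨hlen, ?_⟩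
    intro j hj
    unfold pvCnt
    simp
  | cons c l ih =>
    intro freq hlen
    simp only [List.foldl_cons]
    by_cases ha : PySem.Chars.isalpha c = true
    · simp only [if_pos ha]
      have hrange := pv_alpha_low_range c ha
      have hmodeq : PySem.Int.mod (((PySem.Chars.lowerChar c).toNat : Int) - 97) 26 = pvLow c := by
        show PySem.Int.mod (pvLow c) 26 = pvLow c
        rw [PySem.Int.mod_eq_emod_of_pos (by norm_num)]
        exact Int.emod_eq_of_lt hrange.1 hrange.2
      have hjc_eq : (((PySem.Int.mod (((PySem.Chars.lowerChar c).toNat : Int) - 97) 26).toNat : Nat) : Int) = pvLow c := by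
        rw [hmodeq]
        exact Int.toNat_of_nonneg hrange.1
      set jc := (PySem.Int.mod (((PySem.Chars.lowerChar c).toNat : Int) - 97) 26).toNat with hjcdef
      have hjlt : jc < 26 := by omega
      have hlen' : (freq.set jc (freq.getD jc 0 + 1)).length = 26 := by
        rw [List.length_set]; exact hlen
      obtain ⟨hL, hG⟩ := ih _ hlen'
      refine ⟨hL, ?_⟩
      intro j hj
      rw [hG j hj]
      have hset : (freq.set jc (freq.getD jc 0 + 1)).getD j 0
          = if jc = j then freq.getD jc 0 + 1 else freq.getD j 0 := by
        rw [List.getD_eq_getElem?_getD, List.getElem?_set]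
        by_cases hjj : jc = j
        · rw [if_pos hjj, if_pos (by omega : jc < freq.length), if_pos hjj]
          rfl
        · rw [if_neg hjj, if_neg hjj, List.getD_eq_getElem?_getD]
      rw [hset]
      unfold pvCnt
      rw [List.countP_cons]
      by_cases hjj : jc = j
      · rw [if_pos hjj]
        have hp : (PySem.Chars.isalpha c && decide (pvLow c = (j : Int))) = true := by
          rw [ha, Bool.true_and, decide_eq_true_eq]
          omega
        rw [hp]
        subst hjj
        push_cast
        norm_num
        ring
      · rw [if_neg hjj]
        have hp : (PySem.Chars.isalpha c && decide (pvLow c = (j : Int))) = false := by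
          rw [ha, Bool.true_and, decide_eq_false_iff_not]
          omega
        rw [hp]
        push_cast
        norm_num
    · simp only [if_neg ha]
      obtain ⟨hL, hG⟩ := ih freq hlen
      refine ⟨hL, ?_⟩
      intro j hj
      rw [hG j hj]
      unfold pvCnt
      rw [List.countP_cons]
      have hp : (PySem.Chars.isalpha c && decide (pvLow c = (j : Int))) = false := by
        cases hx : PySem.Chars.isalpha c
        · rw [Bool.false_and]
        · exact absurd hx ha
      rw [hp]
      norm_num

lemma pv_flatMap_singleton {α β : Type} (f : α → β) (l : List α) :
    List.flatMap (fun x => [f x]) l = l.map f := by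
  induction l with
  | nil => rfl
  | cons c l ih => rw [List.flatMap_cons, List.map_cons, List.singleton_append, ih]

lemma pv_countings_eq (l : List Char) :
    (PySem.List.pyRange (-26) 26 1).foldl (fun countings i =>
        countings ++ [(pvCaesarA l i).foldl (fun count_e s =>
          if s = 'e' ∨ s = 'E' then count_e + 1 else count_e) (0 : Int)]) []
      = (PySem.List.pyRange 0 26 1).map (pvG l) ++ (PySem.List.pyRange 0 26 1).map (pvG l) := by
  rw [PySem.List.foldl_append_eq_flatMap (fun i => [(pvCaesarA l i).foldl (fun count_e s =>
    if s = 'e' ∨ s = 'E' then count_e + 1 else count_e) (0 : Int)]), List.nil_append,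
    pv_flatMap_singleton]
  rw [List.map_congr_left (fun i _ => pv_countings_entry l i)]
  exact pv_countings_split l

-- ===== VERDICT (by name: the statement is the Claim_ definition above) =====
theorem decrypt_find_e_spec : Claim_equal_decrypt_find_e := by
  unfold Claim_equal_decrypt_find_e
  intro code _
  unfold Spec_decrypt_find_e
  have hg : ∀ r, 0 ≤ pvG code.toList r := by
    intro r
    unfold pvG pvCnt
    exact Int.natCast_nonneg _
  obtain ⟨m, k, hmax, hidx, hfold⟩ := pv_scan_spec (pvG code.toList) hg 26 (by norm_num)
  rw [show (((26 : Nat) : Int)) = (26 : Int) from by norm_num] at hmax hidx hfold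
  have hAeq : decrypt_find_e code = 26 - (k : Int) := by
    unfold decrypt_find_e
    rw [pv_countings_eq code.toList]
    simp only []
    rw [pv_max_double _ m hmax]
    simp only []
    rw [PySem.List.index?_append_of_mem _ (PySem.List.max?_mem hmax), hidx]
  have hBeq : decrypt_find_e_alt code = 26 - (k : Int) := by
    simp only [decrypt_find_e_alt]
    obtain ⟨hfl, hfg⟩ := pv_freq_spec code.toList (List.replicate 26 0) (by simp)
    have hcong : (PySem.List.pyRange 0 26 1).foldl (fun (best : Int × Int) r =>
        if best.1 < PySem.List.pyGetD (code.toList.foldl (fun freq c =>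
            if PySem.Chars.isalpha c then
              freq.set (PySem.Int.mod (((PySem.Chars.lowerChar c).toNat : Int) - 97) 26).toNat
                (freq.getD (PySem.Int.mod (((PySem.Chars.lowerChar c).toNat : Int) - 97) 26).toNat 0 + 1)
            else freq) (List.replicate 26 (0 : Int))) (PySem.Int.mod (4 - r) 26) 0
          then (PySem.List.pyGetD (code.toList.foldl (fun freq c =>
            if PySem.Chars.isalpha c then
              freq.set (PySem.Int.mod (((PySem.Chars.lowerChar c).toNat : Int) - 97) 26).toNat
                (freq.getD (PySem.Int.mod (((PySem.Chars.lowerChar c).toNat : Int) - 97) 26).toNat 0 + 1)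
            else freq) (List.replicate 26 (0 : Int))) (PySem.Int.mod (4 - r) 26) 0, r)
          else best) ((-1 : Int), (0 : Int))
        = (PySem.List.pyRange 0 26 1).foldl (fun (best : Int × Int) r =>
            if best.1 < pvG code.toList r then (pvG code.toList r, r) else best)
          ((-1 : Int), (0 : Int)) := by
      apply PySem.List.foldl_congr_mem
      intro acc r hr
      rw [PySem.List.mem_pyRange_one] at hr
      have h26 : (0 : Int) < 26 := by norm_num
      have hmod1 : 0 ≤ PySem.Int.mod (4 - r) 26 := by
        rw [PySem.Int.mod_eq_emod_of_pos h26]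
        exact Int.emod_nonneg _ (by norm_num)
      have hmod2 : PySem.Int.mod (4 - r) 26 < 26 := by
        rw [PySem.Int.mod_eq_emod_of_pos h26]
        exact Int.emod_lt_of_pos _ h26
      have hget : PySem.List.pyGetD (code.toList.foldl (fun freq c =>
            if PySem.Chars.isalpha c then
              freq.set (PySem.Int.mod (((PySem.Chars.lowerChar c).toNat : Int) - 97) 26).toNat
                (freq.getD (PySem.Int.mod (((PySem.Chars.lowerChar c).toNat : Int) - 97) 26).toNat 0 + 1)
            else freq) (List.replicate 26 (0 : Int))) (PySem.Int.mod (4 - r) 26) 0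
          = pvG code.toList r := by
        rw [PySem.List.pyGetD_of_nonneg _ _ hmod1]
        rw [hfg _ (by omega : (PySem.Int.mod (4 - r) 26).toNat < 26)]
        rw [List.getD_replicate _ (by omega : (PySem.Int.mod (4 - r) 26).toNat < 26)]
        unfold pvG
        rw [Int.toNat_of_nonneg hmod1]
        ring
      rw [hget]
    rw [hcong, hfold]
  rw [hAeq, hBeq]
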